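-- pv_equiv track=rewrite | github.com/msorkhpar/leetcode-learning-cards | Python/src/array/even_number_of_digits.py | has_even_number_of_digits
-- ===== SOURCE A (Python) =====
-- def has_even_number_of_digits(num: int) -> bool:
--     if num < 2:
--         return False
--     number_of_digits = 0
--     while num > 0:
--         number_of_digits += 1
--         num //= 10
--     return number_of_digits % 2 == 0
-- ===== SOURCE B (Python) =====
-- def has_even_number_of_digits(num: int) -> bool:
--     if num < 2:
--         return False
--     return len(str(num)) % 2 == 0
-- ===== Notes on version B (the rewrite author's own statement) =====
-- stated objective: idiomatic
-- what changed: Replaces the repeated floor-division digit-counting loop with len(str(num)), counting digits over the decimal string representation.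
import Mathlib
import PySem

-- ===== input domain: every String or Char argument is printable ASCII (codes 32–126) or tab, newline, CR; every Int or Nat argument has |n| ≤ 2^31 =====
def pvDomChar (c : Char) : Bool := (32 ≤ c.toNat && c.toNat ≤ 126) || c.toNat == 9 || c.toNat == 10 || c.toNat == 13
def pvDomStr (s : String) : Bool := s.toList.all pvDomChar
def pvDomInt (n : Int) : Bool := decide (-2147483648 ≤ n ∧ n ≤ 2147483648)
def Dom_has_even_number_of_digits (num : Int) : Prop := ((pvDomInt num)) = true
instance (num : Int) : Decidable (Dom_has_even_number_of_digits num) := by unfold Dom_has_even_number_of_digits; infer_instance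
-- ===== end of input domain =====

-- B replaces A's repeated floor-division digit-counting loop with len(str(num)) over the
-- decimal string representation (more idiomatic; same cost).


-- ===== PORT A =====
-- the 'while num > 0:' loop, carrying the Python loop state (num, number_of_digits);
-- fuel only makes the recursion structural (num.toNat always suffices: num strictly shrinks)
def pvLoopA (fuel : Nat) (num : Int) (number_of_digits : Int) : Int :=
  match fuel with
  | 0 => number_of_digits
  | f + 1 =>
    if num > 0 then
      pvLoopA f (PySem.Int.floordiv num 10) (number_of_digits + 1)
    else
      number_of_digits

def has_even_number_of_digits (num : Int) : Bool :=
  if num < 2 then false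
  else PySem.Int.mod (pvLoopA num.toNat num 0) 2 == 0

-- ===== PORT B =====
def has_even_number_of_digits_alt (num : Int) : Bool :=
  if num < 2 then false
  else PySem.Int.mod (PySem.Str.len (PySem.Int.toStr num)) 2 == 0

-- ===== PRECONDITION & SPEC =====
def Spec_has_even_number_of_digits (num : Int) (out : Bool) : Prop := out = has_even_number_of_digits_alt num
instance (num : Int) (out : Bool) : Decidable (Spec_has_even_number_of_digits num out) := by unfold Spec_has_even_number_of_digits; infer_instance

-- ===== CLAIM (what is proved, stated in full; the proofs are below) =====
def Claim_equal_has_even_number_of_digits : Prop := ∀ (num : Int), Dom_has_even_number_of_digits num → Spec_has_even_number_of_digits num (has_even_number_of_digits num)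

-- ===== LEMMAS AND PROOFS =====

-- number of decimal digits of a positive natural (also 1 for 0)
def pvCountD (n : Nat) : Nat :=
  if n < 10 then 1 else pvCountD (n / 10) + 1
termination_by n
decreasing_by omega

theorem pvLoopA_eq (n : Nat) : ∀ (fuel : Nat) (num acc : Int), 0 < num → num.toNat = n →
    n ≤ fuel → pvLoopA fuel num acc = acc + (pvCountD n : Int) := by
  induction n using Nat.strong_induction_on with
  | _ n ih =>
    intro fuel num acc hpos hn hfuel
    match fuel with
    | 0 => omega
    | f + 1 =>
      rw [pvLoopA]
      simp only [hpos, if_pos]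
      by_cases h10 : num < 10
      · have hdiv : PySem.Int.floordiv num 10 = 0 := by
          simp only [PySem.Int.floordiv, Int.fdiv_eq_ediv]; omega
        have hf0 : pvLoopA f 0 (acc + 1) = acc + 1 := by
          match f with
          | 0 => rfl
          | g + 1 => rw [pvLoopA, if_neg (by omega : ¬ ((0:Int) > 0))]
        rw [hdiv, hf0, pvCountD]
        have : n < 10 := by omega
        simp [this]
      · have hpos' : 0 < PySem.Int.floordiv num 10 := by
          simp only [PySem.Int.floordiv, Int.fdiv_eq_ediv]; omega
        have hlt : (PySem.Int.floordiv num 10).toNat < n := by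
          simp only [PySem.Int.floordiv, Int.fdiv_eq_ediv]; omega
        rw [ih _ hlt f _ _ hpos' rfl (by omega)]
        have hn10 : ¬ n < 10 := by omega
        have hq : (PySem.Int.floordiv num 10).toNat = n / 10 := by
          simp only [PySem.Int.floordiv, Int.fdiv_eq_ediv]; omega
        rw [hq]
        conv_rhs => rw [pvCountD]
        rw [if_neg hn10]
        push_cast
        ring

theorem pvToDigitsCore_len (n : Nat) : ∀ (f : Nat), n < f →
    (Nat.toDigitsCore 10 f n []).length = pvCountD n := by
  induction n using Nat.strong_induction_on with
  | _ n ih =>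
    intro f hf
    cases f with
    | zero => omega
    | succ f =>
      rw [Nat.toDigitsCore]
      by_cases h10 : n < 10
      · have hz : n / 10 = 0 := by omega
        rw [if_pos hz, pvCountD, if_pos h10]
        rfl
      · have hne : ¬ n / 10 = 0 := by omega
        simp only [hne, if_neg, not_false_iff]
        rw [Nat.toDigitsCore_lens_eq]
        rw [ih (n / 10) (by omega) f (by omega)]
        conv_rhs => rw [pvCountD]
        rw [if_neg h10]

theorem pvStrLen_eq (num : Int) (h : 0 < num) :
    PySem.Str.len (PySem.Int.toStr num) = (pvCountD num.toNat : Int) := by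
  simp only [PySem.Str.len, PySem.Int.toList_toStr, PySem.Int.toChars]
  have hneg : ¬ num < 0 := by omega
  simp only [hneg, if_neg, not_false_iff]
  rw [Nat.toDigits, pvToDigitsCore_len num.toNat (num.toNat + 1) (by omega)]

-- ===== VERDICT (by name: the statement is the Claim_ definition above) =====
theorem has_even_number_of_digits_spec : Claim_equal_has_even_number_of_digits := by
  intro num _
  unfold Spec_has_even_number_of_digits has_even_number_of_digits has_even_number_of_digits_alt
  by_cases h : num < 2
  · simp [h]
  · have hpos : 0 < num := by omega
    rw [pvLoopA_eq num.toNat num.toNat num 0 hpos rfl le_rfl, pvStrLen_eq num hpos]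
    simp [h]
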